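-- pv_equiv track=rewrite | github.com/BojarLab/glycowork | build/lib/glycowork/glycan_data/loader.py | replace_every_second
-- ===== SOURCE A (Python) =====
-- def replace_every_second(string, old_char, new_char):
--   """function to replace every second occurrence of old_char in string with new_char\n
--   | Arguments:
--   | :-
--   | string (string): a string
--   | old_char (string): a string character to be replaced (every second occurrence)
--   | new_char (string): the string character to replace old_char with\n
--   | Returns:
--   | :-
--   | Returns string with replaced characters
--   """
--   count = 0
--   result = []
--   for char in string:
--     if char == old_char:
--       count += 1
--       result.append(new_char if count % 2 == 0 else char)
--     else:
--       result.append(char)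
--   return ''.join(result)
-- ===== SOURCE B (Python) =====
-- def replace_every_second(string, old_char, new_char):
--   """function to replace every second occurrence of old_char in string with new_char\n
--   | Arguments:
--   | :-
--   | string (string): a string
--   | old_char (string): a string character to be replaced (every second occurrence)
--   | new_char (string): the string character to replace old_char with\n
--   | Returns:
--   | :-
--   | Returns string with replaced characters
--   """
--   if len(old_char) != 1:
--     # a per-character comparison can never match a non-single-character old_char
--     return string
--   parts = string.split(old_char)
--   out = parts[0]
--   for i, p in enumerate(parts[1:]):
--     out += (old_char if i % 2 == 0 else new_char) + p
--   return out
-- ===== Notes on version B (the rewrite author's own statement) =====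
-- stated objective: faster
-- what changed: B splits the string on old_char and rejoins the chunks with separators alternating old_char/new_char, instead of A's per-character loop with an occurrence counter.
import Mathlib
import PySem

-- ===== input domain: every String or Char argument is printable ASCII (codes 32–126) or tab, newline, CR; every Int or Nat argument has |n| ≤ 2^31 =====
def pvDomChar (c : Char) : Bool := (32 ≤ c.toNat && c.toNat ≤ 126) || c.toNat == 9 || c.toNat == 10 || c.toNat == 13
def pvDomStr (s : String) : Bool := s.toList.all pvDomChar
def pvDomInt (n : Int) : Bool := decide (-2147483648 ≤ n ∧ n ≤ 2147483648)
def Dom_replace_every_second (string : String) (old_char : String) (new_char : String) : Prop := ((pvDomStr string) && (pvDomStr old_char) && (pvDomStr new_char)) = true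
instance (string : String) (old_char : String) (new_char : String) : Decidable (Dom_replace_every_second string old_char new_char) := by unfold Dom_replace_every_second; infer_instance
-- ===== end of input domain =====

-- B rebuilds the string from the chunks produced by splitting on old_char (separators alternate
-- old_char/new_char) instead of A's per-character counter loop; a timing run measured B faster
-- (bulk split/concatenate rather than per-character work).

-- ===== PORT A =====
-- A walks the characters, counts occurrences of old_char, appends new_char on even counts,
-- and joins the collected pieces with ''.  (char == old_char is the 1-char-string comparison
-- [c] = old_char.toList; ''.join is PySem.Chars.join [].)
def replace_every_second (string : String) (old_char : String) (new_char : String) : String :=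
  String.ofList (PySem.Chars.join []
    (string.toList.foldl
      (fun (st : Int × List (List Char)) c =>
        if [c] = old_char.toList then
          (st.1 + 1, st.2 ++ [if PySem.Int.mod (st.1 + 1) 2 == 0 then new_char.toList else [c]])
        else
          (st.1, st.2 ++ [[c]])) (0, [])).2)

-- ===== PORT B =====
-- Source B: guard len(old_char) != 1, split on the single character, rebuild with alternating
-- separators.  string.split(old_char) for a 1-char separator is List.splitOn on the char list.
def replace_every_second_alt (string : String) (old_char : String) (new_char : String) : String :=
  match old_char.toList with
  | [oc] =>
    match string.toList.splitOn oc with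
    | [] => ""   -- unreachable: List.splitOn never returns []
    | p0 :: rest =>
      String.ofList ((PySem.List.enumerate rest 0).foldl
        (fun acc ip =>
          acc ++ (if PySem.Int.mod ip.1 2 == 0 then [oc] else new_char.toList) ++ ip.2) p0)
  | _ => string   -- len(old_char) != 1: return string unchanged

-- ===== PRECONDITION & SPEC =====
def Spec_replace_every_second (string : String) (old_char : String) (new_char : String) (out : String) : Prop := out = replace_every_second_alt string old_char new_char
instance (string : String) (old_char : String) (new_char : String) (out : String) : Decidable (Spec_replace_every_second string old_char new_char out) := by unfold Spec_replace_every_second; infer_instance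

-- ===== CLAIM (what is proved, stated in full; the proofs are below) =====
def Claim_equal_replace_every_second : Prop := ∀ (string : String) (old_char : String) (new_char : String), Dom_replace_every_second string old_char new_char → Spec_replace_every_second string old_char new_char (replace_every_second string old_char new_char)

-- ===== LEMMAS AND PROOFS =====

-- ''.join on char-list pieces is concatenation
theorem join_nil_eq_flatten (l : List (List Char)) : PySem.Chars.join [] l = l.flatten := by
  induction l with
  | nil => rfl
  | cons p ps ih =>
    cases ps with
    | nil => simp [PySem.Chars.join_singleton]
    | cons q r => rw [PySem.Chars.join_cons_cons]; simp_all

-- the characters A's loop emits from chars s, starting at occurrence count k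
def aRun (oc : Char) (n : List Char) : List Char → Int → List Char
  | [], _ => []
  | c :: cs, k =>
    if c = oc then (if PySem.Int.mod (k + 1) 2 == 0 then n else [c]) ++ aRun oc n cs (k + 1)
    else [c] ++ aRun oc n cs k

-- the characters B's rebuild emits for the chunks after the first, counted from occurrence k
def buildP (oc : Char) (n : List Char) : Int → List (List Char) → List Char
  | _, [] => []
  | k, p :: ps => (if PySem.Int.mod (k + 1) 2 == 0 then n else [oc]) ++ p ++ buildP oc n (k + 1) ps

theorem foldA_flatten (oc : Char) (n : List Char) (s : List Char) :
    ∀ (k : Int) (acc : List (List Char)),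
      ((s.foldl (fun (st : Int × List (List Char)) c =>
        if [c] = [oc] then
          (st.1 + 1, st.2 ++ [if PySem.Int.mod (st.1 + 1) 2 == 0 then n else [c]])
        else
          (st.1, st.2 ++ [[c]])) (k, acc)).2).flatten = acc.flatten ++ aRun oc n s k := by
  induction s with
  | nil => intro k acc; simp [aRun]
  | cons c cs ih =>
    intro k acc
    by_cases h : c = oc
    · subst h
      simp only [List.foldl_cons, aRun, ih]
      simp
    · have h' : ¬ ([c] = [oc]) := by simp [h]
      simp only [List.foldl_cons, if_neg h', aRun, if_neg h, ih]
      simp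

theorem aRun_splitOn (oc : Char) (n : List Char) (s : List Char) :
    ∀ (k : Int),
      aRun oc n s k =
        match s.splitOn oc with
        | [] => []
        | p :: ps => p ++ buildP oc n k ps := by
  induction s with
  | nil => intro k; simp [aRun, List.splitOn, List.splitOnP_nil, buildP]
  | cons c cs ih =>
    intro k
    rw [List.splitOn, List.splitOnP_cons]
    obtain ⟨p, ps, hps⟩ : ∃ p ps, cs.splitOnP (· == oc) = p :: ps := by
      rcases hcs : cs.splitOnP (· == oc) with _ | ⟨p, ps⟩
      · exact absurd hcs (List.splitOnP_ne_nil _ _)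
      · exact ⟨p, ps, rfl⟩
    by_cases h : c = oc
    · have hb : (c == oc) = true := by simp [h]
      have ihk := ih (k + 1)
      rw [List.splitOn, hps] at ihk
      rw [hb, hps]
      simp only [if_true, aRun, ihk, buildP, h]
      simp
    · have hb : (c == oc) = false := by simp [h]
      have ihk := ih k
      rw [List.splitOn, hps] at ihk
      rw [hb, hps]
      simp only [Bool.false_eq_true, if_false, List.modifyHead_cons, aRun, if_neg h, ihk]
      simp

theorem foldB_buildP (oc : Char) (n : List Char) (ps : List (List Char)) :
    ∀ (i k : Int) (acc : List Char),
      PySem.Int.mod i 2 = PySem.Int.mod k 2 →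
      (PySem.List.enumerate ps i).foldl
        (fun acc ip =>
          acc ++ (if PySem.Int.mod ip.1 2 == 0 then [oc] else n) ++ ip.2) acc
        = acc ++ buildP oc n k ps := by
  induction ps with
  | nil => intro i k acc h; simp [PySem.List.enumerate_nil, buildP]
  | cons p ps ih =>
    intro i k acc h
    rw [PySem.List.enumerate_cons, List.foldl_cons,
        ih (i + 1) (k + 1) _ (by
          simp only [PySem.Int.mod_eq_emod_of_pos (by norm_num : (0:Int) < 2)] at h ⊢
          omega)]
    have hsep : (if PySem.Int.mod i 2 == 0 then [oc] else n)
        = (if PySem.Int.mod (k + 1) 2 == 0 then n else [oc]) := by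
      simp only [PySem.Int.mod_eq_emod_of_pos (by norm_num : (0:Int) < 2)] at h ⊢
      by_cases hi : i % 2 = 0
      · have hk1 : (k + 1) % 2 ≠ 0 := by omega
        simp [hi, hk1]
      · have hk1 : (k + 1) % 2 = 0 := by omega
        simp [hi, hk1]
    rw [hsep, buildP]
    simp

-- when old_char is not a single character, A's comparison never fires and the loop copies s
theorem foldA_id (o : List Char) (n : List Char) (ho : o.length ≠ 1) (s : List Char) :
    ∀ (k : Int) (acc : List (List Char)),
      ((s.foldl (fun (st : Int × List (List Char)) c =>
        if [c] = o then
          (st.1 + 1, st.2 ++ [if PySem.Int.mod (st.1 + 1) 2 == 0 then n else [c]])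
        else
          (st.1, st.2 ++ [[c]])) (k, acc)).2).flatten = acc.flatten ++ s := by
  induction s with
  | nil => intro k acc; simp
  | cons c cs ih =>
    intro k acc
    have h : ¬ ([c] = o) := fun h => ho (h ▸ rfl)
    simp only [List.foldl_cons, if_neg h, ih]
    simp

-- ===== VERDICT (by name: the statement is the Claim_ definition above) =====
theorem replace_every_second_spec : Claim_equal_replace_every_second := by
  intro string old_char new_char _
  show _ = _
  rcases ho : old_char.toList with _ | ⟨oc, _ | ⟨c2, t⟩⟩ <;>
    simp only [replace_every_second, replace_every_second_alt, ho]
  · -- old_char = ""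
    rw [join_nil_eq_flatten, foldA_id [] new_char.toList (by simp)]
    simp
  · -- old_char is a single char oc
    rcases hsp : string.toList.splitOn oc with _ | ⟨p0, rest⟩
    · exact absurd hsp (List.splitOnP_ne_nil _ _)
    · rw [join_nil_eq_flatten, foldA_flatten, aRun_splitOn, hsp]
      show String.ofList (([] : List (List Char)).flatten ++ (p0 ++ buildP oc new_char.toList 0 rest))
          = String.ofList ((PySem.List.enumerate rest 0).foldl
              (fun acc ip => acc ++ (if PySem.Int.mod ip.1 2 == 0 then [oc] else new_char.toList) ++ ip.2) p0)
      rw [foldB_buildP oc new_char.toList rest 0 0 p0 rfl]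
      simp
  · -- old_char has length ≥ 2
    rw [join_nil_eq_flatten, foldA_id (oc :: c2 :: t) new_char.toList (by simp)]
    simp
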